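-- pv_equiv track=rewrite | github.com/ZhongyanChen/tsObservatory | RepoMining/Diff.py | get_line_num_diff
-- ===== SOURCE A (Python) =====
-- def get_line_num_diff(code_block):
--     old_line_num_list = []
--     new_line_num_list = []
--
--     old_line_num = 1
--     new_line_num = 1
--
--     for line in code_block:
--
--         # Unchanged lines
--         if ' ' in line[0]:
--             old_line_num_list.append(old_line_num)
--             new_line_num_list.append(new_line_num)
--             old_line_num += 1
--             new_line_num += 1
--
--         # Added lines
--         if '+' in line[0]:
--             old_line_num_list.append(None)
--             new_line_num_list.append(new_line_num)
--             new_line_num += 1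
--
--         # Deleted lines
--         if '-' in line[0]:
--             old_line_num_list.append(old_line_num)
--             new_line_num_list.append(None)
--             old_line_num += 1
--
--     return [old_line_num_list, new_line_num_list]
-- ===== SOURCE B (Python) =====
-- def get_line_num_diff(code_block):
--     # Two independent passes: the old-line column and the new-line column
--     # each depend only on their own counter, so compute each in its own scan.
--     old_line_num_list = []
--     old_line_num = 1
--     for line in code_block:
--         if ' ' in line[0] or '-' in line[0]:
--             old_line_num_list.append(old_line_num)
--             old_line_num += 1
--         elif '+' in line[0]:
--             old_line_num_list.append(None)
--
--     new_line_num_list = []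
--     new_line_num = 1
--     for line in code_block:
--         if ' ' in line[0] or '+' in line[0]:
--             new_line_num_list.append(new_line_num)
--             new_line_num += 1
--         elif '-' in line[0]:
--             new_line_num_list.append(None)
--
--     return [old_line_num_list, new_line_num_list]
-- ===== Notes on version B (the rewrite author's own statement) =====
-- stated objective: alternative
-- what changed: Instead of one interleaved pass maintaining both output lists and both counters together, B computes the two columns independently: one full pass building the old-line-number list with its own counter, a second full pass building the new-line-number list with its own counter.
import Mathlib
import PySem

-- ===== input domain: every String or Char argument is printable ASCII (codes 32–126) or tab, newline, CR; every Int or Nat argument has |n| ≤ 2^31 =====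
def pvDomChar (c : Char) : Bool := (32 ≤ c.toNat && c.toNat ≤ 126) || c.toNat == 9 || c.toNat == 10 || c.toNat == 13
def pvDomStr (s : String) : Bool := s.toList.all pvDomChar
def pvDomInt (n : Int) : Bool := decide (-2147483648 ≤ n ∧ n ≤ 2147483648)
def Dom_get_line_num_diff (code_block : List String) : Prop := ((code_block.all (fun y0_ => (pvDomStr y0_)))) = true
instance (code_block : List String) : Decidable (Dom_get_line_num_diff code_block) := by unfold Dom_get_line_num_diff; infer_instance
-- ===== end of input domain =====

-- B computes the two output columns in two independent passes (each with its own
-- counter) instead of A's single interleaved pass over shared state; same cost.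


-- ===== PORT A =====
-- A's loop body. Python's `' ' in line[0]`: line[0] is a single-character
-- string, so the substring test is exactly equality of the first character
-- with ' ' (same for '+' and '-'); line[0] itself is PySem.Str.pyGet? line 0
-- (none = IndexError, excluded by Pre_; on none the state is left unchanged).
def pvStepA (st : List (Option Int) × List (Option Int) × Int × Int) (line : String) :
    List (Option Int) × List (Option Int) × Int × Int :=
  match PySem.Str.pyGet? line 0 with
  | none => st
  | some c =>
    let st := if c == ' ' then
      (st.1 ++ [some st.2.2.1], st.2.1 ++ [some st.2.2.2], st.2.2.1 + 1, st.2.2.2 + 1)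
      else st
    let st := if c == '+' then
      (st.1 ++ [none], st.2.1 ++ [some st.2.2.2], st.2.2.1, st.2.2.2 + 1)
      else st
    let st := if c == '-' then
      (st.1 ++ [some st.2.2.1], st.2.1 ++ [none], st.2.2.1 + 1, st.2.2.2)
      else st
    st

def get_line_num_diff (code_block : List String) : List (List (Option Int)) :=
  let st := code_block.foldl pvStepA
    (([], [], 1, 1) : List (Option Int) × List (Option Int) × Int × Int)
  [st.1, st.2.1]

-- ===== PORT B =====
-- first pass of Source B: the old-line-number column
def pvOldPass : List String → Int → List (Option Int)
  | [], _ => []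
  | line :: rest, n =>
    match PySem.Str.pyGet? line 0 with
    | none => pvOldPass rest n
    | some c =>
      if c == ' ' || c == '-' then some n :: pvOldPass rest (n + 1)
      else if c == '+' then none :: pvOldPass rest n
      else pvOldPass rest n

-- second pass of Source B: the new-line-number column
def pvNewPass : List String → Int → List (Option Int)
  | [], _ => []
  | line :: rest, n =>
    match PySem.Str.pyGet? line 0 with
    | none => pvNewPass rest n
    | some c =>
      if c == ' ' || c == '+' then some n :: pvNewPass rest (n + 1)
      else if c == '-' then none :: pvNewPass rest n
      else pvNewPass rest n

def get_line_num_diff_alt (code_block : List String) : List (List (Option Int)) :=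
  [pvOldPass code_block 1, pvNewPass code_block 1]

-- ===== PRECONDITION & SPEC =====
-- Pre_ excludes blocks containing an empty line: there Python's line[0] raises IndexError.
def Pre_get_line_num_diff (code_block : List String) : Prop :=
  ∀ line ∈ code_block, line ≠ ""
instance (code_block : List String) : Decidable (Pre_get_line_num_diff code_block) := by
  unfold Pre_get_line_num_diff; infer_instance

def pvWitness_get_line_num_diff : List String := [" keep", "+add", "-del", "@@ hunk"]

def Spec_get_line_num_diff (code_block : List String) (out : List (List (Option Int))) : Prop := out = get_line_num_diff_alt code_block
instance (code_block : List String) (out : List (List (Option Int))) : Decidable (Spec_get_line_num_diff code_block out) := by unfold Spec_get_line_num_diff; infer_instance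

-- ===== CLAIM (what is proved, stated in full; the proofs are below) =====
def Claim_equal_get_line_num_diff : Prop := ∀ (code_block : List String), Dom_get_line_num_diff code_block → Pre_get_line_num_diff code_block → Spec_get_line_num_diff code_block (get_line_num_diff code_block)

-- ===== LEMMAS AND PROOFS =====

-- final value of A's old-line counter / new-line counter after processing cb
def pvOldEnd : List String → Int → Int
  | [], n => n
  | line :: rest, n =>
    match PySem.Str.pyGet? line 0 with
    | none => pvOldEnd rest n
    | some c =>
      if c == ' ' || c == '-' then pvOldEnd rest (n + 1) else pvOldEnd rest n

def pvNewEnd : List String → Int → Int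
  | [], n => n
  | line :: rest, n =>
    match PySem.Str.pyGet? line 0 with
    | none => pvNewEnd rest n
    | some c =>
      if c == ' ' || c == '+' then pvNewEnd rest (n + 1) else pvNewEnd rest n

-- A's interleaved fold splits into the two independent passes of B
lemma foldl_eq_passes (cb : List String) (ol nl : List (Option Int)) (o n : Int) :
    cb.foldl pvStepA (ol, nl, o, n)
    = (ol ++ pvOldPass cb o, nl ++ pvNewPass cb n, pvOldEnd cb o, pvNewEnd cb n) := by
  induction cb generalizing ol nl o n with
  | nil => simp [pvOldPass, pvNewPass, pvOldEnd, pvNewEnd]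
  | cons line rest ih =>
    rw [List.foldl_cons]
    cases h : PySem.List.pyGet? line.toList 0 with
    | none =>
      have hst : pvStepA (ol, nl, o, n) line = (ol, nl, o, n) := by simp [pvStepA, h]
      rw [hst, ih]
      simp [pvOldPass, pvNewPass, pvOldEnd, pvNewEnd, h]
    | some c =>
      by_cases hs : c = ' '
      · subst hs
        have hst : pvStepA (ol, nl, o, n) line
            = (ol ++ [some o], nl ++ [some n], o + 1, n + 1) := by simp [pvStepA, h]
        rw [hst, ih]
        simp [pvOldPass, pvNewPass, pvOldEnd, pvNewEnd, h]
      · by_cases hp : c = '+'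
        · subst hp
          have hst : pvStepA (ol, nl, o, n) line
              = (ol ++ [none], nl ++ [some n], o, n + 1) := by simp [pvStepA, h]
          rw [hst, ih]
          simp [pvOldPass, pvNewPass, pvOldEnd, pvNewEnd, h]
        · by_cases hm : c = '-'
          · subst hm
            have hst : pvStepA (ol, nl, o, n) line
                = (ol ++ [some o], nl ++ [none], o + 1, n) := by simp [pvStepA, h]
            rw [hst, ih]
            simp [pvOldPass, pvNewPass, pvOldEnd, pvNewEnd, h]
          · have hst : pvStepA (ol, nl, o, n) line = (ol, nl, o, n) := by
              simp [pvStepA, h, hs, hp, hm]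
            rw [hst, ih]
            simp [pvOldPass, pvNewPass, pvOldEnd, pvNewEnd, h, hs, hp, hm]

-- ===== VERDICT (by name: the statement is the Claim_ definition above) =====
theorem get_line_num_diff_spec : Claim_equal_get_line_num_diff := by
  intro cb _ _
  unfold Spec_get_line_num_diff get_line_num_diff get_line_num_diff_alt
  rw [foldl_eq_passes]
  simp
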